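-- pv_equiv track=rewrite | github.com/frankcsaby/expense-tracker | app/utils.py | get_chart_colors
-- ===== SOURCE A (Python) =====
-- def get_chart_colors(count):
--     """Get a list of chart colors."""
--     base_colors = [
--         '#4e73df', '#1cc88a', '#36b9cc', '#f6c23e', '#e74a3b',
--         '#6f42c1', '#5a5c69', '#858796', '#2e59d9', '#17a673'
--     ]
--
--     # Repeat colors if more than 10 items
--     colors = []
--     for i in range(count):
--         colors.append(base_colors[i % len(base_colors)])
--
--     return colors
-- ===== SOURCE B (Python) =====
-- def get_chart_colors(count):
--     """Get a list of chart colors."""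
--     base_colors = [
--         '#4e73df', '#1cc88a', '#36b9cc', '#f6c23e', '#e74a3b',
--         '#6f42c1', '#5a5c69', '#858796', '#2e59d9', '#17a673'
--     ]
--     n = max(count, 0)
--     q, r = divmod(n, len(base_colors))
--     return base_colors * q + base_colors[:r]
-- ===== Notes on version B (the rewrite author's own statement) =====
-- stated objective: alternative
-- what changed: Replaces the per-index modulo loop with bulk block replication: q full copies of the palette (list multiplication) plus a slice of the first r colors, where q, r = divmod(max(count,0), 10).
import Mathlib
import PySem

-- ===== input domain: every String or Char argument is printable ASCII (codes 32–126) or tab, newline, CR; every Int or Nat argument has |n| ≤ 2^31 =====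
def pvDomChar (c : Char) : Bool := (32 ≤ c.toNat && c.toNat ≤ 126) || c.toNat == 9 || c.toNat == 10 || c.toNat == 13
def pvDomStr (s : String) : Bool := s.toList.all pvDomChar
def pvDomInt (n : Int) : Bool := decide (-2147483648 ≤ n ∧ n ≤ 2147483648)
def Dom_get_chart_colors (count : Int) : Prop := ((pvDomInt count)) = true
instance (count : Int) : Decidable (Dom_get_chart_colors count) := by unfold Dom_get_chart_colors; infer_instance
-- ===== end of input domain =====

-- B replaces A's per-index modulo loop by block replication: q full copies of the palette plus a take of the first r colors (q,r = divmod(max(count,0),10)).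


-- ===== PORT A =====
def pvBaseA : List String :=
  ["#4e73df", "#1cc88a", "#36b9cc", "#f6c23e", "#e74a3b",
   "#6f42c1", "#5a5c69", "#858796", "#2e59d9", "#17a673"]

-- base_colors[i % len(base_colors)] never raises (0 ≤ i % 10 < 10), so pyGetD's default is unreachable
def get_chart_colors (count : Int) : List String :=
  (PySem.List.pyRange 0 count 1).foldl
    (fun colors i => colors ++ [PySem.List.pyGetD pvBaseA (PySem.Int.mod i (pvBaseA.length : Int)) ""]) []

-- ===== PORT B =====
def pvBaseB : List String :=
  ["#4e73df", "#1cc88a", "#36b9cc", "#f6c23e", "#e74a3b",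
   "#6f42c1", "#5a5c69", "#858796", "#2e59d9", "#17a673"]

def get_chart_colors_alt (count : Int) : List String :=
  let n := max count 0
  let q := PySem.Int.floordiv n (pvBaseB.length : Int)
  let r := PySem.Int.mod n (pvBaseB.length : Int)
  (List.replicate q.toNat pvBaseB).flatten ++ PySem.List.slice pvBaseB none (some r)

-- ===== PRECONDITION & SPEC =====
def Spec_get_chart_colors (count : Int) (out : List String) : Prop := out = get_chart_colors_alt count
instance (count : Int) (out : List String) : Decidable (Spec_get_chart_colors count out) := by unfold Spec_get_chart_colors; infer_instance

-- ===== CLAIM (what is proved, stated in full; the proofs are below) =====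
def Claim_equal_get_chart_colors : Prop := ∀ (count : Int), Dom_get_chart_colors count → Spec_get_chart_colors count (get_chart_colors count)

-- ===== LEMMAS AND PROOFS =====

-- a prefix of the palette read by index equals take
lemma pv_map_range_getD (base : List String) (d : String) (n : Nat) (hn : n ≤ base.length) :
    (List.range n).map (fun k => base.getD k d) = base.take n := by
  apply List.ext_getElem
  · simp [Nat.min_eq_left hn]
  · intro i h1 h2
    simp only [List.getElem_map, List.getElem_range, List.getElem_take]
    have : i < base.length := by simp at h1; omega
    simp [this]

-- the cyclic-index map over range n equals q full copies plus the first r colors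
lemma pv_cycle (base : List String) (d : String) (hL : base ≠ []) :
    ∀ n : Nat, (List.range n).map (fun k => base.getD (k % base.length) d)
      = (List.replicate (n / base.length) base).flatten ++ base.take (n % base.length) := by
  intro n
  induction n using Nat.strong_induction_on with
  | _ n ih =>
    have hL0 : 0 < base.length := List.length_pos_iff.mpr hL
    by_cases h : n < base.length
    · have hdiv : n / base.length = 0 := Nat.div_eq_of_lt h
      have hmod : n % base.length = n := Nat.mod_eq_of_lt h
      rw [hdiv, hmod]
      simp only [List.replicate_zero, List.flatten_nil, List.nil_append]
      rw [List.map_congr_left (fun k hk => by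
        have : k < n := List.mem_range.mp hk
        rw [Nat.mod_eq_of_lt (by omega)])]
      exact pv_map_range_getD base d n (by omega)
    · rw [Nat.not_lt] at h
      obtain ⟨m, rfl⟩ : ∃ m, n = base.length + m := ⟨n - base.length, by omega⟩
      rw [List.range_add, List.map_append, List.map_map]
      have h1 : (List.range base.length).map (fun k => base.getD (k % base.length) d) = base := by
        rw [List.map_congr_left (fun k hk => by
          rw [Nat.mod_eq_of_lt (List.mem_range.mp hk)])]
        rw [pv_map_range_getD base d base.length le_rfl, List.take_length]
      have h2 : ((fun k => base.getD (k % base.length) d) ∘ (base.length + ·))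
          = fun k => base.getD (k % base.length) d := by
        funext k; simp [Nat.add_mod_left]
      rw [h1, h2, ih m (by omega)]
      have hdiv : (base.length + m) / base.length = m / base.length + 1 := by
        rw [Nat.add_comm, Nat.add_div_right _ hL0]
      have hmod : (base.length + m) % base.length = m % base.length := by
        rw [Nat.add_comm, Nat.add_mod_right]
      rw [hdiv, hmod, List.replicate_succ, List.flatten_cons, List.append_assoc]

-- A as a map over range
lemma pv_A_eq (count : Int) :
    get_chart_colors count
      = (List.range count.toNat).map (fun k => pvBaseA.getD (k % pvBaseA.length) "") := by
  unfold get_chart_colors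
  rw [PySem.List.foldl_append_singleton_eq_map, PySem.List.pyRange_one, List.map_map]
  simp only [List.nil_append, Int.sub_zero]
  apply List.map_congr_left
  intro k _
  simp only [Function.comp_apply, Int.zero_add]
  have : PySem.Int.mod (k : Int) (pvBaseA.length : Int) = ((k % pvBaseA.length : Nat) : Int) := by
    exact_mod_cast PySem.Int.mod_natCast k pvBaseA.length
  rw [this, PySem.List.pyGetD_natCast]

-- ===== VERDICT (by name: the statement is the Claim_ definition above) =====
theorem get_chart_colors_spec : Claim_equal_get_chart_colors := by
  intro count _
  unfold Spec_get_chart_colors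
  simp only [get_chart_colors_alt]
  have hBB : pvBaseB = pvBaseA := rfl
  rw [pv_A_eq, hBB]
  have hne : pvBaseA ≠ [] := by decide
  rw [pv_cycle pvBaseA "" hne count.toNat]
  by_cases hc : count ≤ 0
  · have h0 : count.toNat = 0 := Int.toNat_of_nonpos hc
    have hmax : max count 0 = 0 := by omega
    simp [h0, hmax, PySem.Int.floordiv, PySem.Int.mod, PySem.List.slice]
  · rw [Int.not_le] at hc
    have hmax : max count 0 = count := by omega
    have hcn : count = (count.toNat : Int) := by omega
    rw [hmax]
    have hdiv : PySem.Int.floordiv count (pvBaseA.length : Int)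
        = ((count.toNat / pvBaseA.length : Nat) : Int) := by
      rw [hcn]; exact_mod_cast PySem.Int.floordiv_natCast count.toNat pvBaseA.length
    have hmod : PySem.Int.mod count (pvBaseA.length : Int)
        = ((count.toNat % pvBaseA.length : Nat) : Int) := by
      rw [hcn]; exact_mod_cast PySem.Int.mod_natCast count.toNat pvBaseA.length
    rw [hdiv, hmod, PySem.List.slice_to_natCast, Int.toNat_natCast]
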